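-- pv_equiv track=rewrite | github.com/SriVenkateshMani/LeetCode | 1430-find-the-k-beauty-of-a-number/1430-find-the-k-beauty-of-a-number.py | divisorSubstrings
-- ===== SOURCE A (Python) =====
-- def divisorSubstrings(num: int, k: int) -> int:
--     num = str(num)
--     res = 0
--
--     for i in range(len(num)-k+1):
--         var = int(num[i:i+k])
--         if var != 0 and int(num) % var == 0:
--             res += 1
--
--     return res
-- ===== SOURCE B (Python) =====
-- def divisorSubstrings(num: int, k: int) -> int:
--     # Alternative decomposition: consume the decimal string one character at a
--     # time, testing its k-character prefix, instead of indexing with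
--     # range(len-k+1); reuses num directly instead of re-parsing int(num).
--     s = str(num)
--     res = 0
--     while len(s) >= k:
--         var = int(s[:k])
--         if var != 0 and num % var == 0:
--             res += 1
--         s = s[1:]
--     return res
-- ===== Notes on version B (the rewrite author's own statement) =====
-- stated objective: alternative
-- what changed: The index loop over range(len-k+1) with slices s[i:i+k] is replaced by a loop that consumes the string one character at a time testing its k-character prefix, and num is used directly instead of re-parsing int(num) on every iteration.
import Mathlib
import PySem

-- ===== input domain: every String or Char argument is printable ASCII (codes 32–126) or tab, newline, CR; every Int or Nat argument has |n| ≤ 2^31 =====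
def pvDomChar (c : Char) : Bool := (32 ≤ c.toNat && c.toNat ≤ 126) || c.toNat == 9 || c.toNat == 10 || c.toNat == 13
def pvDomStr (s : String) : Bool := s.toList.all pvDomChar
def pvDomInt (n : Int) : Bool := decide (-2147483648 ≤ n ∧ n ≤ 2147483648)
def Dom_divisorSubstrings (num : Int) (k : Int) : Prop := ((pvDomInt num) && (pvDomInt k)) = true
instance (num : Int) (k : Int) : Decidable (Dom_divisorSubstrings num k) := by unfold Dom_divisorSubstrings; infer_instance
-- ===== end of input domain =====

-- B consumes the decimal string one character at a time testing its k-char prefix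
-- (instead of A's index loop with slices) and reuses num instead of re-parsing int(num).


-- ===== PORT A =====
-- Python A: num = str(num); for i in range(len(num)-k+1): var = int(num[i:i+k]); if var != 0 and int(num) % var == 0: res += 1
def divisorSubstrings (num : Int) (k : Int) : Int :=
  let s : List Char := PySem.Int.toChars num          -- num = str(num)
  (PySem.List.pyRange 0 ((s.length : Int) - k + 1) 1).foldl
    (fun res i =>
      match PySem.Int.ofChars? (PySem.List.slice s (some i) (some (i + k))) with
      | none => res        -- int() raises ValueError here (only outside Pre_); the port skips
      | some var =>
        -- int(num) re-parses str(num) back to the original integer: its value is num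
        if var ≠ 0 ∧ PySem.Int.mod num var = 0 then res + 1 else res)
    0

-- ===== PORT B =====
-- the while loop of Source B: while len(s) >= k: var = int(s[:k]); …; s = s[1:]
def divisorSubstringsAltLoop (num : Int) (k : Int) (res : Int) : List Char → Int
  | [] => res
  | c :: t =>
    if ((c :: t).length : Int) < k then res
    else
      match PySem.Int.ofChars? (PySem.List.slice (c :: t) none (some k)) with
      | none => divisorSubstringsAltLoop num k res t   -- int() raises here (only outside Pre_); the port skips
      | some var =>
        divisorSubstringsAltLoop num k
          (if var ≠ 0 ∧ PySem.Int.mod num var = 0 then res + 1 else res) t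

def divisorSubstrings_alt (num : Int) (k : Int) : Int :=
  divisorSubstringsAltLoop num k 0 (PySem.Int.toChars num)

-- ===== PRECONDITION & SPEC =====
-- Pre_ excludes exactly the inputs where Python A raises ValueError in int():
-- k ≤ 0 (an empty slice, int('')) and negative num with k = 1 (the slice '-').
def Pre_divisorSubstrings (num : Int) (k : Int) : Prop := 1 ≤ k ∧ (0 ≤ num ∨ 2 ≤ k)
instance (num : Int) (k : Int) : Decidable (Pre_divisorSubstrings num k) := by unfold Pre_divisorSubstrings; infer_instance
def pvWitness_divisorSubstrings : Int × Int := (240, 2)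

def Spec_divisorSubstrings (num : Int) (k : Int) (out : Int) : Prop := out = divisorSubstrings_alt num k
instance (num : Int) (k : Int) (out : Int) : Decidable (Spec_divisorSubstrings num k out) := by unfold Spec_divisorSubstrings; infer_instance

-- ===== CLAIM (what is proved, stated in full; the proofs are below) =====
def Claim_equal_divisorSubstrings : Prop := ∀ (num : Int) (k : Int), Dom_divisorSubstrings num k → Pre_divisorSubstrings num k → Spec_divisorSubstrings num k (divisorSubstrings num k)

-- ===== LEMMAS AND PROOFS =====

-- the per-window contribution both programs add for the window w
def pvWindow (num : Int) (w : List Char) : Int :=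
  match PySem.Int.ofChars? w with
  | none => 0
  | some var => if var ≠ 0 ∧ PySem.Int.mod num var = 0 then 1 else 0

-- B's loop accumulates pvWindow over the k-prefixes of the suffixes of s
lemma altLoop_eq_sum (num : Int) (K : Nat) (hK : 1 ≤ K) (s : List Char) (res : Int) :
    divisorSubstringsAltLoop num (K : Int) res s
      = res + ((List.range (s.length + 1 - K)).map
          (fun i => pvWindow num ((s.drop i).take K))).sum := by
  induction s generalizing res with
  | nil =>
    have h0 : 0 + 1 - K = 0 := by omega
    simp [divisorSubstringsAltLoop, h0]
  | cons c t ih =>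
    by_cases h : t.length + 1 < K
    · have hlen : (((c :: t).length : Int) < (K : Int)) := by simp only [List.length_cons]; push_cast; omega
      have h0 : (c :: t).length + 1 - K = 0 := by simp only [List.length_cons]; omega
      rw [divisorSubstringsAltLoop, if_pos hlen, h0]
      simp
    · have hlen : ¬ (((c :: t).length : Int) < (K : Int)) := by simp only [List.length_cons]; push_cast; omega
      have hsucc : (c :: t).length + 1 - K = (t.length + 1 - K) + 1 := by
        simp only [List.length_cons]; omega
      have hslice : PySem.List.slice (c :: t) none (some (K : Int)) = (c :: t).take K :=
        PySem.List.slice_to_natCast (c :: t) K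
      rw [divisorSubstringsAltLoop, if_neg hlen, hslice, hsucc, List.range_succ_eq_map]
      simp only [List.map_cons, List.map_map, List.sum_cons]
      have hstep :
          (match PySem.Int.ofChars? ((c :: t).take K) with
            | none => divisorSubstringsAltLoop num (K : Int) res t
            | some var =>
              divisorSubstringsAltLoop num (K : Int)
                (if var ≠ 0 ∧ PySem.Int.mod num var = 0 then res + 1 else res) t)
          = divisorSubstringsAltLoop num (K : Int) (res + pvWindow num ((c :: t).take K)) t := by
        unfold pvWindow
        rcases hp : PySem.Int.ofChars? ((c :: t).take K) with _ | var
        · simp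
        · dsimp only; split_ifs <;> ring_nf
      rw [hstep, ih]
      simp [Function.comp_def, List.drop_succ_cons]
      ring

-- A's fold accumulates the same contributions over the same windows
lemma aFold_eq_sum (num : Int) (K : Nat) (s : List Char) :
    (PySem.List.pyRange 0 ((s.length : Int) - (K : Int) + 1) 1).foldl
      (fun res i =>
        match PySem.Int.ofChars? (PySem.List.slice s (some i) (some (i + (K : Int)))) with
        | none => res
        | some var => if var ≠ 0 ∧ PySem.Int.mod num var = 0 then res + 1 else res)
      0
    = ((List.range (s.length + 1 - K)).map
        (fun i => pvWindow num ((s.drop i).take K))).sum := by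
  have hbody :
      (fun (res : Int) (i : Int) =>
        match PySem.Int.ofChars? (PySem.List.slice s (some i) (some (i + (K : Int)))) with
        | none => res
        | some var => if var ≠ 0 ∧ PySem.Int.mod num var = 0 then res + 1 else res)
      = fun res i => res + pvWindow num (PySem.List.slice s (some i) (some (i + (K : Int)))) := by
    funext res i
    unfold pvWindow
    rcases hp : PySem.Int.ofChars? (PySem.List.slice s (some i) (some (i + (K : Int)))) with _ | var
    · simp
    · dsimp only; split_ifs <;> ring_nf
  have hcnt : (((s.length : Int) - (K : Int) + 1) - 0).toNat = s.length + 1 - K := by omega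
  rw [hbody, PySem.List.pyRange_one, PySem.List.foldl_add, hcnt, List.map_map]
  rw [zero_add]
  refine congrArg List.sum (List.map_congr_left ?_)
  intro i hi
  simp only [Function.comp_def, zero_add]
  exact congrArg (pvWindow num) (PySem.List.slice_natCast_add s i K)

theorem divisorSubstrings_spec : Claim_equal_divisorSubstrings := by
  intro num k _hdom hpre
  unfold Spec_divisorSubstrings divisorSubstrings divisorSubstrings_alt
  obtain ⟨hk, -⟩ := hpre
  obtain ⟨K, rfl⟩ : ∃ K : Nat, k = (K : Int) := ⟨k.toNat, (Int.toNat_of_nonneg (by omega)).symm⟩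
  have hK : 1 ≤ K := by exact_mod_cast hk
  rw [altLoop_eq_sum num K hK (PySem.Int.toChars num) 0, zero_add]
  exact aFold_eq_sum num K (PySem.Int.toChars num)
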